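-- pv_equiv track=rewrite | github.com/adam-blakey/advent-of-code | day_14/main2.py | write_combinations
-- ===== SOURCE A (Python) =====
-- def write_combinations(number):
--     number_list = []
--     if number.find('X') >= 0:
--         i = number.find('X')
--         call1 = number[0:i] + '0' + number[i+1:]
--         call2 = number[0:i] + '1' + number[i+1:]
--
--         call1_list = write_combinations(call1)
--         call2_list = write_combinations(call2)
--
--         for item in call1_list:
--             number_list.append(item)
--         for item in call2_list:
--             number_list.append(item)
--     else:
--         number_list.append(number)
--
--     return number_list
-- ===== SOURCE B (Python) =====
-- def write_combinations(number):
--     k = sum(1 for c in number if c == 'X')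
--     result = []
--     for n in range(2 ** k):
--         j = k - 1
--         chars = []
--         for c in number:
--             if c == 'X':
--                 chars.append('1' if (n >> j) & 1 else '0')
--                 j -= 1
--             else:
--                 chars.append(c)
--         result.append(''.join(chars))
--     return result
-- ===== Notes on version B (the rewrite author's own statement) =====
-- stated objective: alternative
-- what changed: Replaces A's branching recursion (substitute the first X with 0/1 and recurse on each copy) with a flat enumeration: count the k X's once, then for each counter n in range(2**k) build the string in one pass, placing n's bits most-significant-first into the X positions.
import Mathlib
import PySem

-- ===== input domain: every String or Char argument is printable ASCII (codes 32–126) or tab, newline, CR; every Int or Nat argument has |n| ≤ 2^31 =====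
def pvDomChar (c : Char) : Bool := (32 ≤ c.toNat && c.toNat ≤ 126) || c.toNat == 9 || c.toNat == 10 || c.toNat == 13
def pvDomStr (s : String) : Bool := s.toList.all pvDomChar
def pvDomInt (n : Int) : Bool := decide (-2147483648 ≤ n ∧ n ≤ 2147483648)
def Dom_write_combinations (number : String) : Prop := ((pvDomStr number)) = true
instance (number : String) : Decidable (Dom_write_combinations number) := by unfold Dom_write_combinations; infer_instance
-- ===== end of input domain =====

-- B replaces A's binary recursion (substitute the first 'X' by '0'/'1' and recurse on each copy)
-- with a flat enumeration of a counter 0 .. 2^k-1 whose bits, most-significant-first, fill the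
-- 'X' positions in a single pass per output string (objective: alternative algorithm, same cost).

-- ===== PORT A =====
-- fuel (count of 'X' + 1) is a totality guard only; it is always sufficient (proved below).
def writeCombGo : Nat → String → List String
  | 0, _ => []
  | fuel+1, number =>
    if 0 ≤ PySem.Str.find number "X" then
      let i := PySem.Str.find number "X"
      let call1 := PySem.Str.slice number (some 0) (some i) ++ "0" ++ PySem.Str.slice number (some (i+1)) none
      let call2 := PySem.Str.slice number (some 0) (some i) ++ "1" ++ PySem.Str.slice number (some (i+1)) none
      writeCombGo fuel call1 ++ writeCombGo fuel call2
    else [number]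

def write_combinations (number : String) : List String :=
  writeCombGo (number.toList.count 'X' + 1) number

-- ===== PORT B =====
-- inner loop of Source B: build the characters, consuming one bit (at index j, then j-1, …) per 'X'
def fillBits : List Char → Nat → Nat → List Char
  | [], _, _ => []
  | c :: cs, n, j =>
    if c = 'X' then (if (n >>> j) &&& 1 = 1 then '1' else '0') :: fillBits cs n (j - 1)
    else c :: fillBits cs n j

def write_combinations_alt (number : String) : List String :=
  let k := number.toList.count 'X'
  (List.range (2 ^ k)).map (fun n => String.ofList (fillBits number.toList n (k - 1)))

-- ===== PRECONDITION & SPEC =====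
def Spec_write_combinations (number : String) (out : List String) : Prop := out = write_combinations_alt number
instance (number : String) (out : List String) : Decidable (Spec_write_combinations number out) := by unfold Spec_write_combinations; infer_instance

-- ===== CLAIM (what is proved, stated in full; the proofs are below) =====
def Claim_equal_write_combinations : Prop := ∀ (number : String), Dom_write_combinations number → Spec_write_combinations number (write_combinations number)

-- ===== LEMMAS AND PROOFS =====

-- B's enumeration, phrased over the character list
def altL (cs : List Char) : List String :=
  (List.range (2 ^ cs.count 'X')).map (fun n => String.ofList (fillBits cs n (cs.count 'X' - 1)))

lemma alt_eq (s : String) : write_combinations_alt s = altL s.toList := rfl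

lemma fill_noX {cs : List Char} (h : 'X' ∉ cs) (n j : Nat) : fillBits cs n j = cs := by
  induction cs with
  | nil => rfl
  | cons c cs ih =>
    have hc : c ≠ 'X' := fun hc => h (hc ▸ List.mem_cons_self ..)
    simp only [List.mem_cons, not_or] at h
    simp [fillBits, hc, ih h.2]

lemma fill_append {pre : List Char} (h : 'X' ∉ pre) (cs : List Char) (n j : Nat) :
    fillBits (pre ++ cs) n j = pre ++ fillBits cs n j := by
  induction pre with
  | nil => rfl
  | cons c p ih =>
    have hc : c ≠ 'X' := fun hc => h (hc ▸ List.mem_cons_self ..)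
    simp only [List.mem_cons, not_or] at h
    simp [fillBits, hc, ih h.2]

lemma fill_agree (cs : List Char) : ∀ n m j, cs.count 'X' ≤ j + 1 →
    (∀ t, t < j + 1 → j + 1 - cs.count 'X' ≤ t → (n >>> t) &&& 1 = (m >>> t) &&& 1) →
    fillBits cs n j = fillBits cs m j := by
  induction cs with
  | nil => intro n m j _ _; rfl
  | cons c cs ih =>
    intro n m j hc hb
    by_cases hcX : c = 'X'
    · subst hcX
      have hcnt : ('X' :: cs).count 'X' = cs.count 'X' + 1 := by simp
      rw [hcnt] at hc hb
      have hbit : (n >>> j) &&& 1 = (m >>> j) &&& 1 := hb j (by omega) (by omega)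
      have htail : fillBits cs n (j - 1) = fillBits cs m (j - 1) := by
        refine ih n m (j - 1) (by omega) ?_
        intro t ht hlo
        exact hb t (by omega) (by omega)
      simp [fillBits, hbit, htail]
    · have hcnt : (c :: cs).count 'X' = cs.count 'X' := by simp [hcX]
      rw [hcnt] at hc hb
      simp [fillBits, hcX, ih n m j hc hb]

lemma bit_high_zero {n k : Nat} (h : n < 2 ^ k) : (n >>> k) &&& 1 = 0 := by
  rw [Nat.shiftRight_eq_div_pow, Nat.and_one_is_mod, Nat.div_eq_of_lt h]

lemma bit_high_one {m k : Nat} (h : m < 2 ^ k) : ((2 ^ k + m) >>> k) &&& 1 = 1 := by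
  rw [Nat.shiftRight_eq_div_pow, Nat.and_one_is_mod]
  have h2 : (2 ^ k + m) / 2 ^ k = 1 + m / 2 ^ k := by
    rw [Nat.add_comm, Nat.add_div_right _ (Nat.two_pow_pos k)]
    omega
  rw [h2, Nat.div_eq_of_lt h]

lemma bit_low {m k t : Nat} (_h : m < 2 ^ k) (ht : t < k) :
    ((2 ^ k + m) >>> t) &&& 1 = (m >>> t) &&& 1 := by
  rw [Nat.shiftRight_eq_div_pow, Nat.shiftRight_eq_div_pow, Nat.and_one_is_mod, Nat.and_one_is_mod]
  have hsplit : 2 ^ k = 2 ^ t * (2 * 2 ^ (k - t - 1)) := by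
    rw [← pow_succ']
    rw [← pow_add]
    congr 1
    omega
  rw [hsplit, Nat.mul_add_div (Nat.two_pow_pos t)]
  omega

lemma altL_split (pre suf : List Char) (hpre : 'X' ∉ pre) :
    altL (pre ++ 'X' :: suf) = altL (pre ++ '0' :: suf) ++ altL (pre ++ '1' :: suf) := by
  have hp0 : pre.count 'X' = 0 := List.count_eq_zero.mpr hpre
  have hcX : (pre ++ 'X' :: suf).count 'X' = suf.count 'X' + 1 := by
    simp [List.count_append, hp0]
  have hc0 : (pre ++ '0' :: suf).count 'X' = suf.count 'X' := by
    simp [List.count_append, hp0]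
  have hc1 : (pre ++ '1' :: suf).count 'X' = suf.count 'X' := by
    simp [List.count_append, hp0]
  unfold altL
  rw [hcX, hc0, hc1]
  generalize hk : suf.count 'X' = k
  have hpow : 2 ^ (k + 1) = 2 ^ k + 2 ^ k := by rw [pow_succ]; omega
  rw [hpow, List.range_add, List.map_append, List.map_map]
  congr 1
  · refine List.map_congr_left ?_
    intro n hn
    rw [List.mem_range] at hn
    rw [fill_append hpre, fill_append hpre]
    show String.ofList (pre ++ fillBits ('X' :: suf) n ((k+1) - 1)) = _
    simp only [Nat.add_sub_cancel]
    simp only [fillBits, bit_high_zero hn]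
    have h0 : ('0' : Char) ≠ 'X' := by decide
    simp [h0]
  · refine List.map_congr_left ?_
    intro n hn
    rw [List.mem_range] at hn
    simp only [Function.comp]
    rw [fill_append hpre, fill_append hpre]
    show String.ofList (pre ++ fillBits ('X' :: suf) (2 ^ k + n) ((k+1) - 1)) = _
    simp only [Nat.add_sub_cancel]
    simp only [fillBits, bit_high_one hn]
    have h1 : ('1' : Char) ≠ 'X' := by decide
    have hag : fillBits suf (2 ^ k + n) (k - 1) = fillBits suf n (k - 1) := by
      refine fill_agree suf _ _ _ (by omega) ?_
      intro t ht hlo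
      exact bit_low hn (by omega)
    simp [h1, hag]

-- first-occurrence decomposition from Python's s.find('X') ≥ 0
lemma find_decomp (s : String) (h : 0 ≤ PySem.Str.find s "X") :
    ∃ pre suf, s.toList = pre ++ 'X' :: suf ∧ 'X' ∉ pre ∧
      (PySem.Str.find s "X").toNat = pre.length := by
  have hx : ("X" : String).toList = ['X'] := by decide
  have hfind : PySem.Str.find s "X" = PySem.Chars.find s.toList ['X'] := by
    simp [hx]
  rw [hfind] at h ⊢
  obtain ⟨hpref, hmin⟩ := PySem.Chars.find_spec h
  set i := (PySem.Chars.find s.toList ['X']).toNat with hi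
  obtain ⟨t, ht⟩ := hpref
  simp only [List.singleton_append] at ht
  have hilen : i < s.toList.length := by
    by_contra hge
    have : s.toList.drop i = [] := List.drop_eq_nil_of_le (by omega)
    rw [this] at ht; exact List.cons_ne_nil _ _ ht
  refine ⟨s.toList.take i, t, ?_, ?_, ?_⟩
  · conv_lhs => rw [← List.take_append_drop i s.toList]
    rw [← ht]
  · intro hmem
    obtain ⟨i', hi', hEq⟩ := List.getElem_of_mem hmem
    have hi'i : i' < i := by
      have := hi'; simp [List.length_take] at this; omega
    have hi'len : i' < s.toList.length := by omega
    have hgt : s.toList[i'] = 'X' := by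
      rw [← hEq]; exact (List.getElem_take).symm
    exact hmin i' hi'i ⟨s.toList.drop (i' + 1), by
      rw [List.singleton_append, ← hgt]
      exact (List.drop_eq_getElem_cons hi'len).symm⟩
  · rw [List.length_take]; omega

lemma toList_call (s : String) (c : String) (i : Nat) (hi : (i : Int) = PySem.Str.find s "X") :
    (PySem.Str.slice s (some 0) (some (PySem.Str.find s "X")) ++ c ++
      PySem.Str.slice s (some (PySem.Str.find s "X" + 1)) none).toList
      = s.toList.take i ++ c.toList ++ s.toList.drop (i + 1) := by
  rw [← hi]
  have h1 : (PySem.Str.slice s (some 0) (some (i : Int))).toList = s.toList.take i := by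
    rw [PySem.Str.toList_slice]
    simp [PySem.List.slice_to_natCast]
  have h2 : (PySem.Str.slice s (some ((i : Int) + 1)) none).toList = s.toList.drop (i + 1) := by
    have hcast : ((i : Int) + 1) = ((i + 1 : Nat) : Int) := by push_cast; ring
    simp only [PySem.Str.toList_slice, PySem.Chars.slice_eq_listSlice]
    rw [hcast, PySem.List.slice_from_natCast]
  simp [h1, h2]

lemma goA_eq (k : Nat) : ∀ s : String, s.toList.count 'X' = k →
    writeCombGo (k + 1) s = altL s.toList := by
  induction k with
  | zero =>
    intro s hs
    have hnoX : 'X' ∉ s.toList := List.count_eq_zero.mp hs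
    have hfind : PySem.Str.find s "X" = -1 := by
      rw [PySem.Str.find_eq_neg_one_iff]
      intro hinf
      exact hnoX (hinf.subset (by decide))
    rw [writeCombGo, if_neg (by rw [hfind]; norm_num)]
    unfold altL
    rw [hs]
    simp [fill_noX hnoX]
  | succ k ih =>
    intro s hs
    have hmem : 'X' ∈ s.toList := by
      by_contra hnm
      rw [List.count_eq_zero.mpr hnm] at hs
      exact Nat.noConfusion hs
    have hfind : 0 ≤ PySem.Str.find s "X" := by
      rw [PySem.Str.find_nonneg_iff]
      obtain ⟨l1, l2, hsplit⟩ := List.append_of_mem hmem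
      exact ⟨l1, l2, by simp [hsplit]⟩
    obtain ⟨pre, suf, hdec, hpre, hidx⟩ := find_decomp s hfind
    set i := (PySem.Str.find s "X").toNat with hi
    have hiInt : (i : Int) = PySem.Str.find s "X" := Int.toNat_of_nonneg hfind
    have hlen : pre.length = i := hidx.symm
    have htake : s.toList.take i = pre := by
      rw [hdec, ← hlen, List.take_left]
    have hdrop : s.toList.drop (i + 1) = suf := by
      have hl2 : pre ++ 'X' :: suf = (pre ++ ['X']) ++ suf := by simp
      rw [hdec, ← hlen, hl2, List.drop_left' (by simp)]
    have hcnt1 : ((PySem.Str.slice s (some 0) (some (PySem.Str.find s "X")) ++ "0" ++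
        PySem.Str.slice s (some (PySem.Str.find s "X" + 1)) none)).toList = pre ++ '0' :: suf := by
      rw [toList_call s "0" i hiInt, htake, hdrop]; simp
    have hcnt2 : ((PySem.Str.slice s (some 0) (some (PySem.Str.find s "X")) ++ "1" ++
        PySem.Str.slice s (some (PySem.Str.find s "X" + 1)) none)).toList = pre ++ '1' :: suf := by
      rw [toList_call s "1" i hiInt, htake, hdrop]; simp
    have hp0 : pre.count 'X' = 0 := List.count_eq_zero.mpr hpre
    have hsufcnt : suf.count 'X' = k := by
      rw [hdec] at hs
      simp [List.count_append, hp0] at hs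
      omega
    have hc0 : (pre ++ '0' :: suf).count 'X' = k := by
      simp [List.count_append, hp0, hsufcnt]
    have hc1 : (pre ++ '1' :: suf).count 'X' = k := by
      simp [List.count_append, hp0, hsufcnt]
    rw [writeCombGo, if_pos hfind]
    show writeCombGo (k + 1) (PySem.Str.slice s (some 0) (some (PySem.Str.find s "X")) ++ "0" ++
        PySem.Str.slice s (some (PySem.Str.find s "X" + 1)) none) ++
      writeCombGo (k + 1) (PySem.Str.slice s (some 0) (some (PySem.Str.find s "X")) ++ "1" ++
        PySem.Str.slice s (some (PySem.Str.find s "X" + 1)) none) = altL s.toList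
    rw [ih _ (by rw [hcnt1]; exact hc0), ih _ (by rw [hcnt2]; exact hc1)]
    rw [hcnt1, hcnt2, hdec]
    exact (altL_split pre suf hpre).symm

-- ===== VERDICT (by name: the statement is the Claim_ definition above) =====
theorem write_combinations_spec : Claim_equal_write_combinations := by
  intro number _
  unfold Spec_write_combinations write_combinations
  rw [goA_eq _ number rfl, alt_eq]
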